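-- pv_equiv track=rewrite | github.com/Matcry12/Video-Maker | src/images/phrase_windows.py | _chop_by_words
-- ===== SOURCE A (Python) =====
-- def _chop_by_words(text: str, max_words: int) -> list[str]:
--     """Split text into chunks of at most max_words words at comma/semicolon or word boundary."""
--     words = text.split()
--     if len(words) <= max_words:
--         return [text]
--     chunks: list[str] = []
--     start = 0
--     while start < len(words):
--         end = min(start + max_words, len(words))
--         # Try to break at a comma boundary within the chunk
--         chunk_words = words[start:end]
--         break_at = -1
--         for i in range(len(chunk_words) - 1, max(len(chunk_words) // 2 - 1, -1), -1):
--             if chunk_words[i].endswith(",") or chunk_words[i].endswith(";"):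
--                 break_at = i + 1
--                 break
--         if break_at > 0:
--             end = start + break_at
--         chunks.append(" ".join(words[start:end]))
--         start = end
--     return chunks
-- ===== SOURCE B (Python) =====
-- def _bisect_right(a, x):
--     """Hand-rolled bisect.bisect_right (A imports nothing, so no bisect module)."""
--     lo, hi = 0, len(a)
--     while lo < hi:
--         mid = (lo + hi) // 2
--         if x < a[mid]:
--             hi = mid
--         else:
--             lo = mid + 1
--     return lo
--
--
-- def _chop_by_words(text: str, max_words: int) -> list[str]:
--     """Split text into chunks of at most max_words words at comma/semicolon or word boundary."""
--     words = text.split()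
--     if len(words) <= max_words:
--         return [text]
--     n = len(words)
--     # Precomputed sorted index of break positions; each chunk finds its break by binary search.
--     breaks = [i for i, w in enumerate(words) if w.endswith(",") or w.endswith(";")]
--     cuts = [0]
--     while cuts[-1] < n:
--         start = cuts[-1]
--         end = min(start + max_words, n)
--         j = _bisect_right(breaks, end - 1) - 1
--         if j >= 0 and breaks[j] >= start + (end - start) // 2:
--             end = breaks[j] + 1
--         cuts.append(end)
--     return [" ".join(words[a:b]) for a, b in zip(cuts, cuts[1:])]
-- ===== Notes on version B (the rewrite author's own statement) =====
-- stated objective: alternative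
-- what changed: Replaces A's per-chunk backward scan over the chunk's words by a precomputed sorted index of break positions queried with a hand-written bisect_right binary search; chunk boundaries are first collected in a cuts list and the chunks are produced afterwards by one zip/join pass over consecutive cuts.
import Mathlib
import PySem

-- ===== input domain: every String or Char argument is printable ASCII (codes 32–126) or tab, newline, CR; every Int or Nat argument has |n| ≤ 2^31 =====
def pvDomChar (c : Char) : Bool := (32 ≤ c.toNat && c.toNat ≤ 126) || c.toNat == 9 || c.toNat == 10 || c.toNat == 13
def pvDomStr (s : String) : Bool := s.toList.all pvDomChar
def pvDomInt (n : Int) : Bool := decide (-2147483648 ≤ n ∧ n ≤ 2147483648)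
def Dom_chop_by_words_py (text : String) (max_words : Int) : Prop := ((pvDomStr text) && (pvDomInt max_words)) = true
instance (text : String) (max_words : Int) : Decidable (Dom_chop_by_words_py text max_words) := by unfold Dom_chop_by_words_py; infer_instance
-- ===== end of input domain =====

-- B replaces A's per-chunk backward comma scan by a precomputed sorted index of break
-- positions queried with a hand-written binary search; chunk boundaries are collected
-- first and the chunks produced by one final zip/join pass (objective: alternative).

-- ===== PORT A =====
-- w.endswith(",") or w.endswith(";")
def pvIsBrk (w : String) : Bool := PySem.Str.endswith w "," || PySem.Str.endswith w ";"

-- the 'for i in range(len(chunk_words)-1, max(len//2-1,-1), -1): … break' scan; -1 = not found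
def pvAFor (chunk : List String) : List Int → Int
  | [] => -1
  | i :: rest =>
      -- chunk_words[i]: i is always in range for the ranges A builds
      if pvIsBrk (PySem.List.pyGetD chunk i "") then i + 1 else pvAFor chunk rest

-- the while loop; fuel = words.length suffices since start strictly increases when max_words ≥ 1
def pvALoop (words : List String) (max_words : Int) (start : Int) : Nat → List String
  | 0 => []
  | fuel + 1 =>
      if start < (words.length : Int) then
        let e0 : Int := min (start + max_words) (words.length : Int)
        let chunk := PySem.List.slice words (some start) (some e0)
        let break_at := pvAFor chunk
          (PySem.List.pyRange ((chunk.length : Int) - 1)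
            (max (PySem.Int.floordiv (chunk.length : Int) 2 - 1) (-1)) (-1))
        let e : Int := if break_at > 0 then start + break_at else e0
        PySem.Str.join " " (PySem.List.slice words (some start) (some e)) ::
          pvALoop words max_words e fuel
      else []

def chop_by_words_py (text : String) (max_words : Int) : List String :=
  let words := PySem.Str.split₀ text
  if (words.length : Int) ≤ max_words then [text]
  else pvALoop words max_words 0 words.length

-- ===== PORT B =====
-- breaks = [i for i, w in enumerate(words) if w.endswith(",") or w.endswith(";")]
def pvBrks (ws : List String) : List Int :=
  (PySem.List.enumerate ws).filterMap
    (fun p => if PySem.Str.endswith p.2 "," || PySem.Str.endswith p.2 ";" then some p.1 else none)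

-- Source B's hand-rolled _bisect_right; fuel = len(a) bounds the halving loop
def pvBisect (a : List Int) (x : Int) (lo hi : Int) : Nat → Int
  | 0 => lo
  | fuel + 1 =>
      if lo < hi then
        let mid := PySem.Int.floordiv (lo + hi) 2
        -- a[mid]: mid is in range since 0 ≤ lo ≤ mid < hi ≤ len(a)
        if x < PySem.List.pyGetD a mid 0 then pvBisect a x lo mid fuel
        else pvBisect a x (mid + 1) hi fuel
      else lo

-- Source B's 'while cuts[-1] < n' loop: appends each new cut; state is the last cut
def pvCuts (breaks : List Int) (mw n : Int) (start : Int) : Nat → List Int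
  | 0 => []
  | fuel + 1 =>
      if start < n then
        let e0 : Int := min (start + mw) n
        let j : Int := pvBisect breaks (e0 - 1) 0 (breaks.length : Int) breaks.length - 1
        let e : Int :=
          if 0 ≤ j ∧ start + PySem.Int.floordiv (e0 - start) 2 ≤ PySem.List.pyGetD breaks j 0
          then PySem.List.pyGetD breaks j 0 + 1 else e0
        e :: pvCuts breaks mw n e fuel
      else []

def chop_by_words_py_alt (text : String) (max_words : Int) : List String :=
  let words := PySem.Str.split₀ text
  if (words.length : Int) ≤ max_words then [text]
  else
    let n : Int := (words.length : Int)
    let cuts := (0 : Int) :: pvCuts (pvBrks words) max_words n 0 words.length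
    (cuts.zip cuts.tail).map
      (fun p => PySem.Str.join " " (PySem.List.slice words (some p.1) (some p.2)))

-- ===== PRECONDITION & SPEC =====
-- Pre_ excludes only inputs on which A never returns: with a nonempty word list and
-- max_words ≤ 0 the while loop never advances (end ≤ start), so A diverges.
def Pre_chop_by_words_py (text : String) (max_words : Int) : Prop :=
  1 ≤ max_words ∨ PySem.Str.split₀ text = []
instance (text : String) (max_words : Int) : Decidable (Pre_chop_by_words_py text max_words) := by
  unfold Pre_chop_by_words_py; infer_instance

def pvWitness_chop_by_words_py : String × Int := ("one two, three four five", 3)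

def Spec_chop_by_words_py (text : String) (max_words : Int) (out : List String) : Prop :=
  out = chop_by_words_py_alt text max_words
instance (text : String) (max_words : Int) (out : List String) :
    Decidable (Spec_chop_by_words_py text max_words out) := by
  unfold Spec_chop_by_words_py; infer_instance

-- ===== CLAIM (what is proved, stated in full; the proofs are below) =====
def Claim_equal_chop_by_words_py : Prop :=
  ∀ (text : String) (max_words : Int), Dom_chop_by_words_py text max_words →
    Pre_chop_by_words_py text max_words →
    Spec_chop_by_words_py text max_words (chop_by_words_py text max_words)

-- ===== LEMMAS AND PROOFS =====

-- greatest k ≤ j with pvIsBrk ws[k], as an Option (specification function)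
def pvMaxBrk (ws : List String) : Nat → Option Nat
  | 0 => if pvIsBrk (ws.getD 0 "") then some 0 else none
  | j + 1 => if pvIsBrk (ws.getD (j + 1) "") then some (j + 1) else pvMaxBrk ws j

theorem pvMaxBrk_le (ws : List String) (j m : Nat) (h : pvMaxBrk ws j = some m) : m ≤ j := by
  induction j with
  | zero =>
    simp only [pvMaxBrk] at h
    split_ifs at h <;> simp_all
  | succ j ih =>
    simp only [pvMaxBrk] at h
    split_ifs at h
    · simp_all
    · exact le_trans (ih h) (Nat.le_succ j)

theorem pvMaxBrk_self (ws : List String) (j : Nat) (hb : pvIsBrk (ws.getD j "") = true) :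
    pvMaxBrk ws j = some j := by
  cases j with
  | zero => simp only [pvMaxBrk]; rw [if_pos hb]
  | succ k => simp only [pvMaxBrk]; rw [if_pos hb]

theorem pvMaxBrk_lt (ws : List String) (j m : Nat) (hb : ¬ pvIsBrk (ws.getD j "") = true)
    (h : pvMaxBrk ws j = some m) : m < j := by
  cases j with
  | zero => simp only [pvMaxBrk] at h; rw [if_neg hb] at h; cases h
  | succ k =>
    simp only [pvMaxBrk] at h
    rw [if_neg hb] at h
    exact Nat.lt_succ_of_le (pvMaxBrk_le ws k m h)

-- a pvMaxBrk of none means: no break at any position ≤ j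
theorem pvMaxBrk_none (ws : List String) (j : Nat) (h : pvMaxBrk ws j = none) :
    ∀ k, k ≤ j → pvIsBrk (ws.getD k "") = false := by
  induction j with
  | zero =>
    intro k hk
    have hk0 : k = 0 := by omega
    subst hk0
    simp only [pvMaxBrk] at h
    by_cases hb : pvIsBrk (ws.getD 0 "") = true
    · rw [if_pos hb] at h; cases h
    · simpa using hb
  | succ j ih =>
    intro k hk
    simp only [pvMaxBrk] at h
    by_cases hb : pvIsBrk (ws.getD (j + 1) "") = true
    · rw [if_pos hb] at h; cases h
    · rw [if_neg hb] at h
      rcases Nat.lt_or_ge k (j + 1) with hlt | hge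
      · exact ih h k (by omega)
      · have hkj : k = j + 1 := by omega
        subst hkj
        simpa using hb

-- a pvMaxBrk of some m means: break at m, none strictly between m and j
theorem pvMaxBrk_some_brk (ws : List String) (j m : Nat) (h : pvMaxBrk ws j = some m) :
    pvIsBrk (ws.getD m "") = true := by
  induction j with
  | zero =>
    simp only [pvMaxBrk] at h
    by_cases hb : pvIsBrk (ws.getD 0 "") = true
    · rw [if_pos hb] at h; cases h; exact hb
    · rw [if_neg hb] at h; cases h
  | succ j ih =>
    simp only [pvMaxBrk] at h
    by_cases hb : pvIsBrk (ws.getD (j + 1) "") = true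
    · rw [if_pos hb] at h; cases h; exact hb
    · rw [if_neg hb] at h; exact ih h

theorem pvMaxBrk_some_max (ws : List String) (j m : Nat) (h : pvMaxBrk ws j = some m) :
    ∀ k, m < k → k ≤ j → pvIsBrk (ws.getD k "") = false := by
  induction j with
  | zero => intro k hk1 hk2; omega
  | succ j ih =>
    intro k hk1 hk2
    simp only [pvMaxBrk] at h
    by_cases hb : pvIsBrk (ws.getD (j + 1) "") = true
    · rw [if_pos hb] at h
      cases h
      omega
    · rw [if_neg hb] at h
      rcases Nat.lt_or_ge k (j + 1) with hlt | hge
      · exact ih h k hk1 (by omega)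
      · have hkj : k = j + 1 := by omega
        subst hkj
        simpa using hb

-- A's backward scan over range(hi, lo-1, -1) finds pvMaxBrk chunk hi iff it is ≥ lo
theorem pvAFor_range (chunk : List String) (hi lo : Nat) (hhi : hi < chunk.length)
    (hlo : lo ≤ hi + 1) :
    pvAFor chunk (PySem.List.pyRange (hi : Int) ((lo : Int) - 1) (-1)) =
      (match pvMaxBrk chunk hi with
       | some m => if lo ≤ m then (m : Int) + 1 else -1
       | none => -1) := by
  induction hd : hi + 1 - lo generalizing hi lo with
  | zero =>
    have : (hi : Int) ≤ (lo : Int) - 1 := by omega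
    rw [PySem.List.pyRange_neg_one_eq_nil this]
    simp [pvAFor]
    cases hm : pvMaxBrk chunk hi with
    | none => simp
    | some m =>
      have := pvMaxBrk_le chunk hi m hm
      have : ¬ lo ≤ m := by omega
      simp [this]
  | succ d ih =>
    have hlolt : lo ≤ hi := by omega
    rw [PySem.List.pyRange_neg_one_cons (by omega : ((lo : Int) - 1) < (hi : Int))]
    simp only [pvAFor]
    rw [PySem.List.pyGetD_natCast]
    by_cases hb : pvIsBrk (chunk.getD hi "") = true
    · rw [if_pos hb, pvMaxBrk_self chunk hi hb]
      show ((hi : Int) + 1) = if lo ≤ hi then (hi : Int) + 1 else -1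
      rw [if_pos hlolt]
    · rw [if_neg hb]
      cases hi with
      | zero =>
        have hlo0 : lo = 0 := by omega
        rw [show (((0 : Nat) : Int)) - 1 = (0 : Int) - 1 by norm_num,
            PySem.List.pyRange_neg_one_eq_nil (by omega : (0 : Int) - 1 ≤ ((lo : Int) - 1))]
        have hm0 : pvMaxBrk chunk 0 = none := by
          simp only [pvMaxBrk]
          rw [if_neg hb]
        rw [hm0]
        rfl
      | succ k =>
        have hrec := ih k lo (by omega) (by omega) (by omega)
        rw [show (((k + 1 : Nat) : Int)) - 1 = ((k : Nat) : Int) by push_cast; ring]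
        rw [hrec]
        have hm : pvMaxBrk chunk (k + 1) = pvMaxBrk chunk k := by
          simp only [pvMaxBrk]
          rw [if_neg hb]
        rw [hm]

-- indexing into a slice
theorem pvSlice_getD (ws : List String) (s L i : Nat) (hi : i < L) (h : s + L ≤ ws.length) :
    (List.take L (List.drop s ws)).getD i "" = ws.getD (s + i) "" := by
  simp [List.getD, List.getElem?_take, hi, List.getElem?_drop]

-- pvMaxBrk of a slice in terms of pvMaxBrk of the whole list
theorem pvMaxBrk_slice (ws : List String) (s L : Nat) (h : s + L ≤ ws.length) :
    ∀ (j : Nat), j < L →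
    pvMaxBrk (List.take L (List.drop s ws)) j =
      (match pvMaxBrk ws (s + j) with
       | some m => if s ≤ m then some (m - s) else none
       | none => none) := by
  intro j hj
  induction j with
  | zero =>
    simp only [pvMaxBrk]
    rw [pvSlice_getD ws s L 0 hj h]
    by_cases hb : pvIsBrk (ws.getD (s + 0) "") = true
    · rw [pvMaxBrk_self ws (s + 0) hb, if_pos hb]
      show some 0 = if s ≤ s + 0 then some (s + 0 - s) else none
      rw [if_pos (by omega)]
      congr 1
      omega
    · rw [if_neg hb]
      cases hr : pvMaxBrk ws (s + 0) with
      | none => simp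
      | some m =>
        have hlt := pvMaxBrk_lt ws (s + 0) m hb hr
        have hnle : ¬ s ≤ m := by omega
        simp [hnle]
  | succ j ihj =>
    have hg := pvSlice_getD ws s L (j + 1) hj h
    by_cases hb : pvIsBrk (ws.getD (s + (j + 1)) "") = true
    · rw [pvMaxBrk_self _ (j + 1) (by rw [hg]; exact hb),
          pvMaxBrk_self ws (s + (j + 1)) hb]
      simp
    · have h1 : pvMaxBrk (List.take L (List.drop s ws)) (j + 1) =
          pvMaxBrk (List.take L (List.drop s ws)) j := by
        simp only [pvMaxBrk]
        rw [hg, if_neg hb]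
      have h2 : pvMaxBrk ws (s + (j + 1)) = pvMaxBrk ws (s + j) := by
        rw [show s + (j + 1) = (s + j) + 1 by omega]
        simp only [pvMaxBrk]
        rw [if_neg (by rw [show (s + j) + 1 = s + (j + 1) by omega]; exact hb)]
      rw [h1, h2]
      exact ihj (by omega)

-- Int-valued variant (-1 = no break), convenient for omega
def pvMB (ws : List String) (j : Nat) : Int :=
  match pvMaxBrk ws j with
  | some m => (m : Int)
  | none => -1

theorem pvAFor_range' (chunk : List String) (hi lo : Nat) (hhi : hi < chunk.length)
    (hlo : lo ≤ hi + 1) :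
    pvAFor chunk (PySem.List.pyRange (hi : Int) ((lo : Int) - 1) (-1)) =
      if (lo : Int) ≤ pvMB chunk hi then pvMB chunk hi + 1 else -1 := by
  rw [pvAFor_range chunk hi lo hhi hlo]
  unfold pvMB
  cases hm : pvMaxBrk chunk hi with
  | none =>
    simp
    omega
  | some m =>
    by_cases hlm : lo ≤ m
    · simp [hlm]
    · simp [hlm]

theorem pvMaxBrk_slice' (ws : List String) (s L : Nat) (h : s + L ≤ ws.length)
    (j : Nat) (hj : j < L) :
    pvMB (List.take L (List.drop s ws)) j =
      if (s : Int) ≤ pvMB ws (s + j) then pvMB ws (s + j) - (s : Int) else -1 := by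
  unfold pvMB
  rw [pvMaxBrk_slice ws s L h j hj]
  cases hm : pvMaxBrk ws (s + j) with
  | none =>
    simp
    omega
  | some m =>
    by_cases hsm : s ≤ m
    · simp [hsm]
    · simp [hsm]

theorem pvFloordiv_natCast (a : Nat) : PySem.Int.floordiv (a : Int) 2 = ((a / 2 : Nat) : Int) := by
  simp [PySem.Int.floordiv, Int.fdiv_eq_ediv]

-- ----- the breaks index -----

theorem pvBrks_eq (ws : List String) :
    pvBrks ws = (PySem.List.enumerate ws).filterMap
      (fun p => if pvIsBrk p.2 then some p.1 else none) := rfl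

theorem mem_pvBrks (ws : List String) (b : Int) :
    b ∈ pvBrks ws ↔ ∃ k : Nat, k < ws.length ∧ b = (k : Int) ∧ pvIsBrk (ws.getD k "") = true := by
  rw [pvBrks_eq, List.mem_filterMap]
  constructor
  · rintro ⟨p, hp, hfp⟩
    rw [PySem.List.mem_enumerate_iff] at hp
    obtain ⟨k, hk, rfl⟩ := hp
    simp only at hfp
    by_cases hb : pvIsBrk ws[k] = true
    · rw [if_pos hb] at hfp
      refine ⟨k, hk, ?_, ?_⟩
      · cases hfp; simp
      · rw [List.getD_eq_getElem ws "" hk]; exact hb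
    · rw [if_neg hb] at hfp; cases hfp
  · rintro ⟨k, hk, rfl, hb⟩
    refine ⟨((0 : Int) + (k : Int), ws[k]), ?_, ?_⟩
    · rw [PySem.List.mem_enumerate_iff]
      exact ⟨k, hk, rfl⟩
    · simp only
      rw [if_pos (by rw [← List.getD_eq_getElem ws "" hk]; exact hb)]
      simp

theorem pairwise_pvBrks (ws : List String) : (pvBrks ws).Pairwise (· < ·) := by
  rw [pvBrks_eq]
  refine List.Pairwise.filterMap _ ?_ (PySem.List.pairwise_lt_enumerate ws 0)
  intro p q hpq b hb b' hb'
  by_cases h1 : pvIsBrk p.2 = true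
  · by_cases h2 : pvIsBrk q.2 = true
    · rw [if_pos h1] at hb
      rw [if_pos h2] at hb'
      cases hb; cases hb'; exact hpq
    · rw [if_neg h2] at hb'; cases hb'
  · rw [if_neg h1] at hb; cases hb

-- on a strictly sorted list, filtering (· ≤ x) keeps exactly a prefix
theorem pvFilter_eq_takeWhile (a : List Int) (x : Int) (h : a.Pairwise (· < ·)) :
    a.filter (fun b => decide (b ≤ x)) = a.takeWhile (fun b => decide (b ≤ x)) := by
  induction a with
  | nil => rfl
  | cons y ys ih =>
    rw [List.pairwise_cons] at h
    by_cases hy : y ≤ x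
    · simp only [List.filter_cons, List.takeWhile_cons, hy, decide_true, if_pos, ih h.2]
    · have hnil : ys.filter (fun b => decide (b ≤ x)) = [] := by
        rw [List.filter_eq_nil_iff]
        intro b hb
        have : y < b := h.1 b hb
        simp only [decide_eq_true_eq]
        omega
      simp [List.filter_cons, List.takeWhile_cons, hy, hnil]

theorem pvFilter_len_split (a : List Int) (x : Int) (k : Nat) (hk : k ≤ a.length)
    (h1 : ∀ i : Nat, i < k → ∀ h : i < a.length, a[i] ≤ x)
    (h2 : ∀ i : Nat, k ≤ i → ∀ h : i < a.length, x < a[i]) :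
    (a.filter (fun b => decide (b ≤ x))).length = k := by
  conv_lhs => rw [← List.take_append_drop k a]
  rw [List.filter_append]
  have htake : (a.take k).filter (fun b => decide (b ≤ x)) = a.take k := by
    rw [List.filter_eq_self]
    intro b hb
    rw [List.mem_iff_getElem] at hb
    obtain ⟨i, hi, rfl⟩ := hb
    rw [List.getElem_take]
    have hi' : i < k := by
      have := hi
      simp [List.length_take] at this
      omega
    simpa using h1 i hi' _
  have hdrop : (a.drop k).filter (fun b => decide (b ≤ x)) = [] := by
    rw [List.filter_eq_nil_iff]
    intro b hb
    rw [List.mem_iff_getElem] at hb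
    obtain ⟨i, hi, rfl⟩ := hb
    rw [List.getElem_drop]
    have hik : k ≤ k + i := by omega
    have := h2 (k + i) hik (by simp at hi; omega)
    simp only [decide_eq_true_eq]
    omega
  rw [htake, hdrop]
  simp [List.length_take]
  omega

-- the filtered prefix of the breaks index up to x
def pvFle (ws : List String) (x : Int) : List Int :=
  (pvBrks ws).filter (fun b => decide (b ≤ x))

theorem pvFle_nil_of_none (ws : List String) (j : Nat) (h : pvMaxBrk ws j = none) :
    pvFle ws (j : Int) = [] := by
  unfold pvFle
  rw [List.filter_eq_nil_iff]
  intro b hb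
  rw [mem_pvBrks] at hb
  obtain ⟨k, hk, rfl, hbrk⟩ := hb
  simp only [decide_eq_true_eq]
  intro hle
  have hkj : k ≤ j := by exact_mod_cast hle
  have hf := pvMaxBrk_none ws j h k hkj
  rw [hbrk] at hf
  cases hf

theorem pvFle_sel_of_some (ws : List String) (j m : Nat) (hj : j < ws.length)
    (h : pvMaxBrk ws j = some m) :
    0 < (pvFle ws (j : Int)).length ∧
      PySem.List.pyGetD (pvBrks ws) (((pvFle ws (j : Int)).length : Int) - 1) 0 = (m : Int) := by
  have hmj := pvMaxBrk_le ws j m h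
  have hmlen : m < ws.length := by omega
  have hmem : (m : Int) ∈ pvFle ws (j : Int) := by
    unfold pvFle
    rw [List.mem_filter]
    refine ⟨?_, by simp; exact_mod_cast hmj⟩
    rw [mem_pvBrks]
    exact ⟨m, hmlen, rfl, pvMaxBrk_some_brk ws j m h⟩
  have hub : ∀ b ∈ pvFle ws (j : Int), b ≤ (m : Int) := by
    intro b hb
    unfold pvFle at hb
    rw [List.mem_filter] at hb
    obtain ⟨hbm, hble⟩ := hb
    rw [mem_pvBrks] at hbm
    obtain ⟨k, hk, rfl, hbrk⟩ := hbm
    have hkj : k ≤ j := by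
      have : ((k : Int) ≤ (j : Int)) := by simpa using hble
      exact_mod_cast this
    by_contra hgt
    push_neg at hgt
    have hmk : m < k := by exact_mod_cast hgt
    have hf := pvMaxBrk_some_max ws j m h k hmk hkj
    rw [hbrk] at hf
    cases hf
  have hpw : (pvFle ws (j : Int)).Pairwise (· < ·) :=
    List.Pairwise.filter _ (pairwise_pvBrks ws)
  obtain ⟨i, hi, hieq⟩ := List.mem_iff_getElem.mp hmem
  have hlen : 0 < (pvFle ws (j : Int)).length := by omega
  refine ⟨hlen, ?_⟩
  have hilast : i = (pvFle ws (j : Int)).length - 1 := by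
    by_contra hne
    have hilt : i < (pvFle ws (j : Int)).length - 1 := by omega
    have hlt : (pvFle ws (j : Int))[i] < (pvFle ws (j : Int))[(pvFle ws (j : Int)).length - 1] :=
      List.pairwise_iff_getElem.mp hpw i ((pvFle ws (j : Int)).length - 1) hi (by omega) (by omega)
    have hle2 : (pvFle ws (j : Int))[(pvFle ws (j : Int)).length - 1] ≤ (m : Int) :=
      hub _ (List.getElem_mem _)
    rw [hieq] at hlt
    omega
  have hpre : pvFle ws (j : Int) <+: pvBrks ws := by
    unfold pvFle
    rw [pvFilter_eq_takeWhile _ _ (pairwise_pvBrks ws)]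
    exact List.takeWhile_prefix _
  have hflen : (pvFle ws (j : Int)).length ≤ (pvBrks ws).length := hpre.length_le
  have hcast : (((pvFle ws (j : Int)).length : Int) - 1) =
      ((((pvFle ws (j : Int)).length - 1 : Nat)) : Int) := by omega
  rw [hcast, PySem.List.pyGetD_natCast, List.getD_eq_getElem _ 0 (by omega)]
  subst hilast
  exact (hpre.getElem hi).symm.trans hieq

-- Source B's binary search returns the number of elements ≤ x (bisect_right on a sorted list)
theorem pvBisect_eq (a : List Int) (x : Int) (hs : a.Pairwise (· < ·)) :
    ∀ (fuel : Nat) (lo hi : Int), 0 ≤ lo → lo ≤ hi → hi ≤ (a.length : Int) →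
    (hi - lo).toNat ≤ fuel →
    (∀ i : Nat, (i : Int) < lo → ∀ h : i < a.length, a[i] ≤ x) →
    (∀ i : Nat, hi ≤ (i : Int) → ∀ h : i < a.length, x < a[i]) →
    pvBisect a x lo hi fuel = ((a.filter (fun b => decide (b ≤ x))).length : Int) := by
  have hmono := List.pairwise_iff_getElem.mp hs
  intro fuel
  induction fuel with
  | zero =>
    intro lo hi hlo hlh hhi hfuel h1 h2
    have hloeq : lo = hi := by omega
    subst hloeq
    show lo = _
    rw [pvFilter_len_split a x lo.toNat (by omega)
      (fun i hi h => h1 i (by omega) h) (fun i hi h => h2 i (by omega) h)]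
    omega
  | succ fuel ih =>
    intro lo hi hlo hlh hhi hfuel h1 h2
    simp only [pvBisect]
    by_cases hcond : lo < hi
    · rw [if_pos hcond]
      have hfd : PySem.Int.floordiv (lo + hi) 2 = (lo + hi) / 2 := by
        simp [PySem.Int.floordiv, Int.fdiv_eq_ediv]
      have hmidlo : lo ≤ PySem.Int.floordiv (lo + hi) 2 := by rw [hfd]; omega
      have hmidhi : PySem.Int.floordiv (lo + hi) 2 < hi := by rw [hfd]; omega
      obtain ⟨k, hkeq⟩ : ∃ k : Nat, PySem.Int.floordiv (lo + hi) 2 = (k : Int) :=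
        ⟨(PySem.Int.floordiv (lo + hi) 2).toNat, by omega⟩
      have hklen : k < a.length := by omega
      have hget : PySem.List.pyGetD a (PySem.Int.floordiv (lo + hi) 2) 0 = a[k] := by
        rw [hkeq, PySem.List.pyGetD_natCast, List.getD_eq_getElem a 0 hklen]
      rw [hget]
      by_cases hx : x < a[k]
      · rw [if_pos hx]
        refine ih lo (PySem.Int.floordiv (lo + hi) 2) hlo hmidlo (by omega) (by omega) h1 ?_
        intro i hi' h
        rcases Nat.lt_or_ge k i with hki | hik
        · exact lt_trans hx (hmono k i hklen h hki)
        · have : i = k := by omega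
          subst this
          exact hx
      · rw [if_neg hx]
        refine ih (PySem.Int.floordiv (lo + hi) 2 + 1) hi (by omega) (by omega) hhi
          (by omega) ?_ h2
        intro i hi' h
        rcases Nat.lt_or_ge i k with hik | hki
        · exact le_of_lt (lt_of_lt_of_le (hmono i k h hklen hik) (by omega))
        · have : i = k := by omega
          subst this
          omega
    · rw [if_neg hcond]
      have hloeq : lo = hi := by omega
      subst hloeq
      rw [pvFilter_len_split a x lo.toNat (by omega)
        (fun i hi h => h1 i (by omega) h) (fun i hi h => h2 i (by omega) h)]
      omega

-- ----- the two loops -----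

theorem pvLoop_eq (words : List String) (mw : Int) (hmw : 1 ≤ mw) :
    ∀ (fuel : Nat) (start : Int), 0 ≤ start →
    pvALoop words mw start fuel =
      ((start :: pvCuts (pvBrks words) mw (words.length : Int) start fuel).zip
        (pvCuts (pvBrks words) mw (words.length : Int) start fuel)).map
        (fun p => PySem.Str.join " " (PySem.List.slice words (some p.1) (some p.2))) := by
  intro fuel
  induction fuel with
  | zero => intro start _; rfl
  | succ fuel ih =>
    intro start hstart
    simp only [pvALoop, pvCuts]
    by_cases hin : start < (words.length : Int)
    · simp only [hin, if_true]
      set n : Nat := words.length with hn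
      set e0 : Int := min (start + mw) (n : Int) with he0
      obtain ⟨s, hs⟩ : ∃ s : Nat, start = (s : Int) := ⟨start.toNat, by omega⟩
      have hsn : s < n := by omega
      have he0lb : start + 1 ≤ e0 := by omega
      have he0ub : e0 ≤ (n : Int) := by omega
      obtain ⟨e0n, he0n⟩ : ∃ e0n : Nat, e0 = (e0n : Int) := ⟨e0.toNat, by omega⟩
      set L : Nat := e0n - s with hL
      have hL1 : 1 ≤ L := by omega
      have hsL : s + L ≤ n := by omega
      set chunk := PySem.List.slice words (some start) (some e0) with hchunkdef
      have hchunk : chunk = List.take L (List.drop s words) := by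
        rw [hchunkdef, hs, he0n,
            PySem.List.slice_of_nonneg words (by omega) (by omega) (by omega) (by omega)]
        congr 1 <;> simp <;> omega
      have hchunklen : (List.take L (List.drop s words)).length = L := by
        simp; omega
      have he01 : e0 - 1 = (((e0n - 1 : Nat)) : Int) := by omega
      have hj1 : e0n - 1 < words.length := by omega
      set M : Int := pvMB words (e0n - 1) with hM
      have hfd : start + PySem.Int.floordiv (e0 - start) 2 = (s : Int) + ((L / 2 : Nat) : Int) := by
        rw [hs, he0n, show (e0n : Int) - (s : Int) = ((L : Nat) : Int) by omega,
            pvFloordiv_natCast]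
      -- A's end: backward scan result in canonical form
      have hA : (if pvAFor chunk
            (PySem.List.pyRange ((chunk.length : Int) - 1)
              (max (PySem.Int.floordiv (chunk.length : Int) 2 - 1) (-1)) (-1)) > 0
          then start + pvAFor chunk
            (PySem.List.pyRange ((chunk.length : Int) - 1)
              (max (PySem.Int.floordiv (chunk.length : Int) 2 - 1) (-1)) (-1))
          else e0) =
          (if (s : Int) + ((L / 2 : Nat) : Int) ≤ M then M + 1 else e0) := by
        rw [hchunk, hchunklen]
        have hmax : max (PySem.Int.floordiv (L : Int) 2 - 1) (-1) = ((L / 2 : Nat) : Int) - 1 := by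
          rw [pvFloordiv_natCast]; omega
        have hLm1 : ((L : Int) - 1) = (((L - 1 : Nat)) : Int) := by omega
        rw [hmax, hLm1]
        rw [pvAFor_range' (List.take L (List.drop s words)) (L - 1) (L / 2)
              (by omega) (by omega)]
        rw [pvMaxBrk_slice' words s L (by omega) (L - 1) (by omega)]
        rw [show s + (L - 1) = e0n - 1 by omega, ← hM, hs]
        split_ifs <;> omega
      -- B's binary search returns the number of break positions ≤ e0 - 1
      have hBis : pvBisect (pvBrks words) (e0 - 1) 0 (((pvBrks words).length : Nat) : Int)
            (pvBrks words).length = ((pvFle words (e0 - 1)).length : Int) := by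
        refine pvBisect_eq (pvBrks words) (e0 - 1) (pairwise_pvBrks words)
          (pvBrks words).length 0 (((pvBrks words).length : Nat) : Int) (by omega) (by omega)
          (by omega) (by omega) ?_ ?_
        · intro i hi h
          exact absurd hi (by omega)
        · intro i hi h
          exact absurd hi (by omega)
      -- B's end: bisect lookup in the same canonical form
      have hB : (if 0 ≤ pvBisect (pvBrks words) (e0 - 1) 0 (((pvBrks words).length : Nat) : Int)
              (pvBrks words).length - 1 ∧
            start + PySem.Int.floordiv (e0 - start) 2 ≤
              PySem.List.pyGetD (pvBrks words)
                (pvBisect (pvBrks words) (e0 - 1) 0 (((pvBrks words).length : Nat) : Int)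
                  (pvBrks words).length - 1) 0
          then PySem.List.pyGetD (pvBrks words)
                (pvBisect (pvBrks words) (e0 - 1) 0 (((pvBrks words).length : Nat) : Int)
                  (pvBrks words).length - 1) 0 + 1
          else e0) =
          (if (s : Int) + ((L / 2 : Nat) : Int) ≤ M then M + 1 else e0) := by
        rw [hBis, hfd]
        cases hmm : pvMaxBrk words (e0n - 1) with
        | none =>
          have hM1 : M = -1 := by rw [hM]; unfold pvMB; rw [hmm]
          have hnil : pvFle words (e0 - 1) = [] := by
            rw [he01]; exact pvFle_nil_of_none words (e0n - 1) hmm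
          rw [hnil, hM1]
          simp only [List.length_nil, Nat.cast_zero]
          rw [if_neg (by omega), if_neg (by omega)]
        | some m =>
          obtain ⟨hpos, hsel⟩ := pvFle_sel_of_some words (e0n - 1) m hj1 hmm
          have hMm : M = (m : Int) := by rw [hM]; unfold pvMB; rw [hmm]
          rw [he01]
          rw [hsel, hMm]
          have hc := hpos
          split_ifs <;> omega
      have hcanon : (0 : Int) ≤ (if (s : Int) + ((L / 2 : Nat) : Int) ≤ M then M + 1 else e0) := by
        split_ifs with hgt <;> omega
      rw [hA, hB, List.zip_cons_cons, List.map_cons, ih _ hcanon]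
    · simp [hin]

-- ===== VERDICT (by name: the statement is the Claim_ definition above) =====
theorem chop_by_words_py_spec : Claim_equal_chop_by_words_py := by
  intro text max_words _hdom hpre
  unfold Spec_chop_by_words_py chop_by_words_py chop_by_words_py_alt
  simp only []
  by_cases hle : ((PySem.Str.split₀ text).length : Int) ≤ max_words
  · simp [hle]
  · simp only [hle, if_false]
    rcases hpre with hmw | hnil
    · exact pvLoop_eq (PySem.Str.split₀ text) max_words hmw (PySem.Str.split₀ text).length 0 le_rfl
    · rw [hnil]; rfl
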